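-- pv_equiv track=rewrite | github.com/carlosresu/esoa | run_drugs_pt_4_esoa_to_annex_f.py | _forms_compatible
-- ===== SOURCE A (Python) =====
-- EQUIVALENT_FORMS = {
--     frozenset({"tablet", "capsule"}),
--     frozenset({"ampule", "vial"}),
--     frozenset({"solution", "suspension"}),
-- }
--
-- FORM_NORMALIZE = {
--     "tab": "tablet",
--     "tabs": "tablet",
--     "cap": "capsule",
--     "caps": "capsule",
--     "amp": "ampule",
--     "amps": "ampule",
--     "ampoule": "ampule",
--     "ampul": "ampule",
--     "vl": "vial",
--     "inj": "injection",
--     "soln": "solution",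
--     "sol": "solution",
--     "susp": "suspension",
--     "supp": "suppository",
--     "supps": "suppository",
--     "crm": "cream",
--     "oint": "ointment",
--     "neb": "nebule",
--     "nebs": "nebule",
--     "nebules": "nebule",
--     "sach": "sachet",
--     "sachet": "sachet",
--     "sachets": "sachet",
--     "gtts": "drops",
--     "drop": "drops",
--     "pwdr": "powder",
--     "gran": "granule",
--     "granules": "granule",
--     "loz": "lozenge",
--     "lozenges": "lozenge",
-- }
--
-- def _normalize_form(form: str) -> str:
--     """Normalize form abbreviations to canonical form."""
--     f = form.lower().strip()
--     return FORM_NORMALIZE.get(f, f)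
--
-- def _forms_compatible(form1: str, form2: str) -> bool:
--     """Check if two forms are compatible (equivalent)."""
--     f1 = _normalize_form(form1)
--     f2 = _normalize_form(form2)
--     if f1 == f2:
--         return True
--     for equiv_set in EQUIVALENT_FORMS:
--         if f1 in equiv_set and f2 in equiv_set:
--             return True
--     return False
-- ===== SOURCE B (Python) =====
-- # B: canonical-class map — normalize each form to one representative per equivalence class
-- # and compare; the equality short-circuit and the loop over EQUIVALENT_FORMS disappear.
--
-- FORM_NORMALIZE = {
--     "tab": "tablet",
--     "tabs": "tablet",
--     "cap": "capsule",
--     "caps": "capsule",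
--     "amp": "ampule",
--     "amps": "ampule",
--     "ampoule": "ampule",
--     "ampul": "ampule",
--     "vl": "vial",
--     "inj": "injection",
--     "soln": "solution",
--     "sol": "solution",
--     "susp": "suspension",
--     "supp": "suppository",
--     "supps": "suppository",
--     "crm": "cream",
--     "oint": "ointment",
--     "neb": "nebule",
--     "nebs": "nebule",
--     "nebules": "nebule",
--     "sach": "sachet",
--     "sachet": "sachet",
--     "sachets": "sachet",
--     "gtts": "drops",
--     "drop": "drops",
--     "pwdr": "powder",
--     "gran": "granule",
--     "granules": "granule",
--     "loz": "lozenge",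
--     "lozenges": "lozenge",
-- }
--
-- # one representative per equivalence class; forms outside any class canonicalize to themselves
-- FORM_CLASS = {
--     "tablet": "tablet",
--     "capsule": "tablet",
--     "ampule": "ampule",
--     "vial": "ampule",
--     "solution": "solution",
--     "suspension": "solution",
-- }
--
--
-- def _canon(form: str) -> str:
--     f = form.lower().strip()
--     f = FORM_NORMALIZE.get(f, f)
--     return FORM_CLASS.get(f, f)
--
--
-- def _forms_compatible(form1: str, form2: str) -> bool:
--     """Check if two forms are compatible (equivalent)."""
--     return _canon(form1) == _canon(form2)
-- ===== Notes on version B (the rewrite author's own statement) =====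
-- stated objective: simpler
-- what changed: Replaced the equality short-circuit plus the scan over the set of equivalence classes with a precomputed canonical-representative map: each form is canonicalized once and the result is a single string comparison.
import Mathlib
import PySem

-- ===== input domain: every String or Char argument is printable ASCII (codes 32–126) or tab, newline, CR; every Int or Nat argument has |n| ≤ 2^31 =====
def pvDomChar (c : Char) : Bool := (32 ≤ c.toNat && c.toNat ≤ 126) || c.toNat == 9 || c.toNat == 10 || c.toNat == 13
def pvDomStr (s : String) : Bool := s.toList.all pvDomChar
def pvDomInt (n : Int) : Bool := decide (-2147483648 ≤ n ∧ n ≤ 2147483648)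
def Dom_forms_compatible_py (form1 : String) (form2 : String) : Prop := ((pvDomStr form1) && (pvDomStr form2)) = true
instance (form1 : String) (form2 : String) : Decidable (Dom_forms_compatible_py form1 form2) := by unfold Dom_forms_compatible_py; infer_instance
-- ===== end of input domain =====

-- B replaces the equality test plus the scan over equivalence sets by a canonical-class
-- map lookup and a single string comparison (simpler control flow, same behaviour).

-- ===== PORT A =====
-- FORM_NORMALIZE (shared module constant, used verbatim by both implementations)
def pvFormNormalize : PySem.Dict String String := PySem.Dict.ofList
  [("tab", "tablet"), ("tabs", "tablet"), ("cap", "capsule"), ("caps", "capsule"),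
   ("amp", "ampule"), ("amps", "ampule"), ("ampoule", "ampule"), ("ampul", "ampule"),
   ("vl", "vial"), ("inj", "injection"), ("soln", "solution"), ("sol", "solution"),
   ("susp", "suspension"), ("supp", "suppository"), ("supps", "suppository"),
   ("crm", "cream"), ("oint", "ointment"), ("neb", "nebule"), ("nebs", "nebule"),
   ("nebules", "nebule"), ("sach", "sachet"), ("sachet", "sachet"), ("sachets", "sachet"),
   ("gtts", "drops"), ("drop", "drops"), ("pwdr", "powder"), ("gran", "granule"),
   ("granules", "granule"), ("loz", "lozenge"), ("lozenges", "lozenge")]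

-- _normalize_form
def pvNormalizeForm (form : String) : String :=
  let f := PySem.Str.strip (PySem.Str.lower form)
  pvFormNormalize.getD f f

-- EQUIVALENT_FORMS (a set of frozensets; the loop's result does not depend on iteration order)
def pvEquivForms : List (PySem.Set String) :=
  [PySem.Set.ofList ["tablet", "capsule"],
   PySem.Set.ofList ["ampule", "vial"],
   PySem.Set.ofList ["solution", "suspension"]]

-- 'for equiv_set in EQUIVALENT_FORMS: if f1 in equiv_set and f2 in equiv_set: return True'
def pvEquivLoop (f1 f2 : String) : List (PySem.Set String) → Bool
  | [] => false
  | s :: rest =>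
      if PySem.Set.contains s f1 && PySem.Set.contains s f2 then true
      else pvEquivLoop f1 f2 rest

def forms_compatible_py (form1 : String) (form2 : String) : Bool :=
  let f1 := pvNormalizeForm form1
  let f2 := pvNormalizeForm form2
  if f1 == f2 then true
  else pvEquivLoop f1 f2 pvEquivForms

-- ===== PORT B =====
-- FORM_CLASS: one representative per equivalence class
def pvFormClass : PySem.Dict String String := PySem.Dict.ofList
  [("tablet", "tablet"), ("capsule", "tablet"), ("ampule", "ampule"),
   ("vial", "ampule"), ("solution", "solution"), ("suspension", "solution")]

-- _canon
def pvCanon (form : String) : String :=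
  let f := PySem.Str.strip (PySem.Str.lower form)
  let f := pvFormNormalize.getD f f
  pvFormClass.getD f f

def forms_compatible_py_alt (form1 : String) (form2 : String) : Bool :=
  pvCanon form1 == pvCanon form2

-- ===== PRECONDITION & SPEC =====
def Spec_forms_compatible_py (form1 : String) (form2 : String) (out : Bool) : Prop := out = forms_compatible_py_alt form1 form2
instance (form1 : String) (form2 : String) (out : Bool) : Decidable (Spec_forms_compatible_py form1 form2 out) := by unfold Spec_forms_compatible_py; infer_instance

-- ===== CLAIM (what is proved, stated in full; the proofs are below) =====
def Claim_equal_forms_compatible_py : Prop := ∀ (form1 : String) (form2 : String), Dom_forms_compatible_py form1 form2 → Spec_forms_compatible_py form1 form2 (forms_compatible_py form1 form2)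

-- ===== LEMMAS AND PROOFS =====

-- a string outside every equivalence class canonicalizes to itself
theorem pv_class_self (x : String)
    (h1 : x ≠ "tablet") (h2 : x ≠ "capsule") (h3 : x ≠ "ampule")
    (h4 : x ≠ "vial") (h5 : x ≠ "solution") (h6 : x ≠ "suspension") :
    pvFormClass.getD x x = x := by
  rw [show pvFormClass = PySem.Dict.mk
        [("tablet", "tablet"), ("capsule", "tablet"), ("ampule", "ampule"),
         ("vial", "ampule"), ("solution", "solution"), ("suspension", "solution")] from rfl]
  simp [PySem.Dict.getD_eq_get?_getD,
        Ne.symm h1, Ne.symm h2, Ne.symm h3, Ne.symm h4, Ne.symm h5, Ne.symm h6,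
        PySem.Dict.get?]

-- a string outside every equivalence class is in no equivalence set, so the loop yields false
theorem pv_loop_false_left (x y : String)
    (h1 : x ≠ "tablet") (h2 : x ≠ "capsule") (h3 : x ≠ "ampule")
    (h4 : x ≠ "vial") (h5 : x ≠ "solution") (h6 : x ≠ "suspension") :
    pvEquivLoop x y pvEquivForms = false := by
  simp only [pvEquivForms, pvEquivLoop]
  simp [PySem.Set.contains, h1, h2, h3, h4, h5, h6]

theorem pv_loop_false_right (x y : String)
    (h1 : y ≠ "tablet") (h2 : y ≠ "capsule") (h3 : y ≠ "ampule")
    (h4 : y ≠ "vial") (h5 : y ≠ "solution") (h6 : y ≠ "suspension") :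
    pvEquivLoop x y pvEquivForms = false := by
  simp only [pvEquivForms, pvEquivLoop]
  simp [PySem.Set.contains, h1, h2, h3, h4, h5, h6]

-- the core fact, on already-normalized strings
theorem pv_key (x y : String) :
    (if x == y then true else pvEquivLoop x y pvEquivForms) =
      (pvFormClass.getD x x == pvFormClass.getD y y) := by
  by_cases hx : x = "tablet" ∨ x = "capsule" ∨ x = "ampule" ∨ x = "vial" ∨ x = "solution" ∨ x = "suspension"
  · by_cases hy : y = "tablet" ∨ y = "capsule" ∨ y = "ampule" ∨ y = "vial" ∨ y = "solution" ∨ y = "suspension"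
    · rcases hx with rfl | rfl | rfl | rfl | rfl | rfl <;>
        rcases hy with rfl | rfl | rfl | rfl | rfl | rfl <;> decide
    · push Not at hy
      obtain ⟨hy1, hy2, hy3, hy4, hy5, hy6⟩ := hy
      rw [pv_loop_false_right x y hy1 hy2 hy3 hy4 hy5 hy6,
          pv_class_self y hy1 hy2 hy3 hy4 hy5 hy6]
      have c1 : pvFormClass.getD "tablet" "tablet" = "tablet" := by decide
      have c2 : pvFormClass.getD "capsule" "capsule" = "tablet" := by decide
      have c3 : pvFormClass.getD "ampule" "ampule" = "ampule" := by decide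
      have c4 : pvFormClass.getD "vial" "vial" = "ampule" := by decide
      have c5 : pvFormClass.getD "solution" "solution" = "solution" := by decide
      have c6 : pvFormClass.getD "suspension" "suspension" = "solution" := by decide
      rcases hx with rfl | rfl | rfl | rfl | rfl | rfl <;>
        simp [c1, c2, c3, c4, c5, c6,
              Ne.symm hy1, Ne.symm hy2, Ne.symm hy3, Ne.symm hy4, Ne.symm hy5, Ne.symm hy6]
  · push Not at hx
    obtain ⟨hx1, hx2, hx3, hx4, hx5, hx6⟩ := hx
    rw [pv_loop_false_left x y hx1 hx2 hx3 hx4 hx5 hx6,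
        pv_class_self x hx1 hx2 hx3 hx4 hx5 hx6]
    by_cases hy : y = "tablet" ∨ y = "capsule" ∨ y = "ampule" ∨ y = "vial" ∨ y = "solution" ∨ y = "suspension"
    · have c1 : pvFormClass.getD "tablet" "tablet" = "tablet" := by decide
      have c2 : pvFormClass.getD "capsule" "capsule" = "tablet" := by decide
      have c3 : pvFormClass.getD "ampule" "ampule" = "ampule" := by decide
      have c4 : pvFormClass.getD "vial" "vial" = "ampule" := by decide
      have c5 : pvFormClass.getD "solution" "solution" = "solution" := by decide
      have c6 : pvFormClass.getD "suspension" "suspension" = "solution" := by decide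
      rcases hy with rfl | rfl | rfl | rfl | rfl | rfl <;>
        simp [c1, c2, c3, c4, c5, c6, hx1, hx2, hx3, hx4, hx5, hx6]
    · push Not at hy
      obtain ⟨hy1, hy2, hy3, hy4, hy5, hy6⟩ := hy
      rw [pv_class_self y hy1 hy2 hy3 hy4 hy5 hy6]
      by_cases h : x = y <;> simp [h]

-- ===== VERDICT (by name: the statement is the Claim_ definition above) =====
theorem forms_compatible_py_spec : Claim_equal_forms_compatible_py := by
  intro form1 form2 _
  unfold Spec_forms_compatible_py forms_compatible_py forms_compatible_py_alt pvCanon pvNormalizeForm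
  exact pv_key _ _
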